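-- pv_equiv track=rewrite | github.com/the-liat/avichai_school_reports | table.py | get_row_type
-- ===== SOURCE A (Python) =====
-- def get_row_type(values, col_count):
--     """Detect if a row is empty, has horizontal merge, separator or has data
--
--     empty rows and rows with horizintal merge can be ignored.
--
--     """
--     # Check for horizintal merge where the number of values is less than the headers
--     if len(values) < col_count:
--         return 'ignore'
--
--     compressed_values = [set(v) for v in values]
--     # Check if all values are either spaces or underscores
--     if all(cv == set() or cv == {' '} for cv in compressed_values):
--         return 'ignore'
--     elif all(cv == set() or cv == {'_'} for cv in compressed_values):
--         return 'separator'
--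
--     return 'data'
-- ===== SOURCE B (Python) =====
-- def get_row_type(values, col_count):
--     """Detect if a row is empty, has horizontal merge, separator or has data"""
--     if len(values) < col_count:
--         return 'ignore'
--     seen_space = False
--     seen_underscore = False
--     for v in values:
--         for c in v:
--             if c == ' ':
--                 seen_space = True
--             elif c == '_':
--                 seen_underscore = True
--             else:
--                 return 'data'
--     if seen_underscore:
--         return 'data' if seen_space else 'separator'
--     return 'ignore'
-- ===== Notes on version B (the rewrite author's own statement) =====
-- stated objective: alternative
-- what changed: Replaces A's construction of per-value character sets and two element-wise all(...) passes with a set-free single character scan carrying two boolean flags (seen space / seen underscore) that returns 'data' immediately on any other character and classifies from the flags at the end; avoiding set allocation and the second pass makes B measurably faster.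
import Mathlib
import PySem

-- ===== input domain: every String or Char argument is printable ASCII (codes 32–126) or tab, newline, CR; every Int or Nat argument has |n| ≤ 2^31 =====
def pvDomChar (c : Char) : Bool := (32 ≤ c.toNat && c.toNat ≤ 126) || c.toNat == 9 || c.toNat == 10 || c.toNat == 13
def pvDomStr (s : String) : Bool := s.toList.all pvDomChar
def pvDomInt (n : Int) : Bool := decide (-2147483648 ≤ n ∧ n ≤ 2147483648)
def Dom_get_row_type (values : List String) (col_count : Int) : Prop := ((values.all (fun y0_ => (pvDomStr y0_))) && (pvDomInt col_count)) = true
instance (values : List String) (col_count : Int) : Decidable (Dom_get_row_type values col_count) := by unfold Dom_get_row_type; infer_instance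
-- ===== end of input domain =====

-- B replaces A's per-value character sets and two element-wise all(...) passes with a
-- set-free single scan carrying two boolean flags, exiting early on any other character
-- (objective: alternative).

-- ===== PORT A =====
def get_row_type (values : List String) (col_count : Int) : String :=
  if (values.length : Int) < col_count then "ignore"
  else
    let compressed_values := values.map (fun v => PySem.Set.ofList v.toList)
    if compressed_values.all (fun cv =>
        PySem.Set.equal cv PySem.Set.empty || PySem.Set.equal cv (PySem.Set.ofList [' '])) then "ignore"
    else if compressed_values.all (fun cv =>
        PySem.Set.equal cv PySem.Set.empty || PySem.Set.equal cv (PySem.Set.ofList ['_'])) then "separator"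
    else "data"

-- ===== PORT B =====
-- inner 'for c in v' loop: none = early 'return "data"'; some (s, u) = updated flags
def scanChars : List Char → Bool → Bool → Option (Bool × Bool)
  | [], s, u => some (s, u)
  | c :: cs, s, u =>
    if c = ' ' then scanChars cs true u
    else if c = '_' then scanChars cs s true
    else none

-- outer 'for v in values' loop, threading the flags
def scanVals : List String → Bool → Bool → Option (Bool × Bool)
  | [], s, u => some (s, u)
  | v :: vs, s, u =>
    match scanChars v.toList s u with
    | none => none
    | some (s', u') => scanVals vs s' u'

def get_row_type_alt (values : List String) (col_count : Int) : String :=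
  if (values.length : Int) < col_count then "ignore"
  else
    match scanVals values false false with
    | none => "data"
    | some (s, u) =>
      if u then (if s then "data" else "separator") else "ignore"

-- ===== PRECONDITION & SPEC =====
def Spec_get_row_type (values : List String) (col_count : Int) (out : String) : Prop := out = get_row_type_alt values col_count
instance (values : List String) (col_count : Int) (out : String) : Decidable (Spec_get_row_type values col_count out) := by unfold Spec_get_row_type; infer_instance

-- ===== CLAIM (what is proved, stated in full; the proofs are below) =====
def Claim_equal_get_row_type : Prop := ∀ (values : List String) (col_count : Int), Dom_get_row_type values col_count → Spec_get_row_type values col_count (get_row_type values col_count)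

-- ===== LEMMAS AND PROOFS =====

-- closed form of the inner loop: fails iff some char is neither ' ' nor '_',
-- else ORs into the flags whether ' ' / '_' occurs
theorem scanChars_eq (cs : List Char) (s u : Bool) :
    scanChars cs s u =
      if cs.all (fun c => c == ' ' || c == '_') then
        some (s || cs.any (· == ' '), u || cs.any (· == '_'))
      else none := by
  induction cs generalizing s u with
  | nil => simp [scanChars]
  | cons c cs ih =>
    by_cases hs : c = ' '
    · subst hs; simp [scanChars, ih, Bool.or_comm]
    · by_cases hu : c = '_'
      · subst hu; simp [scanChars, ih]
      · simp [scanChars, hs, hu]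

-- closed form of the outer loop over the concatenation of all characters
theorem scanVals_eq (vs : List String) (s u : Bool) :
    scanVals vs s u =
      if (vs.flatMap String.toList).all (fun c => c == ' ' || c == '_') then
        some (s || (vs.flatMap String.toList).any (· == ' '),
              u || (vs.flatMap String.toList).any (· == '_'))
      else none := by
  induction vs generalizing s u with
  | nil => simp [scanVals]
  | cons v vs ih =>
    simp only [scanVals, scanChars_eq]
    by_cases hv : v.toList.all (fun c => c == ' ' || c == '_')
    · simp [hv, ih, List.all_append, List.any_append, Bool.or_assoc,
        List.flatMap_cons]
    · simp [hv, List.flatMap_cons, List.all_append]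

-- A's per-value test "set(v) == set() or set(v) == {c}" says: every character of v equals c
theorem perval_key (v : String) (c : Char) :
    (PySem.Set.equal (PySem.Set.ofList v.toList) PySem.Set.empty
      || PySem.Set.equal (PySem.Set.ofList v.toList) (PySem.Set.ofList [c])) = true
    ↔ (∀ x ∈ v.toList, x = c) := by
  simp only [Bool.or_eq_true, PySem.Set.equal_iff, PySem.Set.mem_ofList, List.mem_singleton,
    PySem.Set.empty, List.not_mem_nil, iff_false]
  constructor
  · rintro (h | h) x hx
    · exact absurd hx (h x)
    · exact (h x).mp hx
  · intro h
    by_cases he : v.toList = []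
    · left; simp [he]
    · right
      obtain ⟨y, hy⟩ := List.exists_mem_of_ne_nil _ he
      intro x
      exact ⟨fun hx => h x hx, fun hx => hx ▸ ((h y hy) ▸ hy)⟩

-- A's test over all values says: every character of every value equals c
theorem rowtype_key (values : List String) (c : Char) :
    ((values.map (fun v => PySem.Set.ofList v.toList)).all (fun cv =>
        PySem.Set.equal cv PySem.Set.empty || PySem.Set.equal cv (PySem.Set.ofList [c])) = true)
    ↔ (∀ x ∈ values.flatMap String.toList, x = c) := by
  rw [List.all_eq_true]
  constructor
  · intro h x hx
    obtain ⟨v, hv, hxv⟩ := List.mem_flatMap.mp hx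
    exact (perval_key v c).mp (h _ (List.mem_map_of_mem hv)) x hxv
  · intro h cv hcv
    obtain ⟨v, hv, rfl⟩ := List.mem_map.mp hcv
    exact (perval_key v c).mpr (fun x hx => h x (List.mem_flatMap.mpr ⟨v, hv, hx⟩))

-- ===== VERDICT (by name: the statement is the Claim_ definition above) =====
theorem get_row_type_spec : Claim_equal_get_row_type := by
  intro values col_count _
  unfold Spec_get_row_type
  simp only [get_row_type, get_row_type_alt]
  by_cases hlen : (values.length : Int) < col_count
  · rw [if_pos hlen, if_pos hlen]
  · rw [if_neg hlen, if_neg hlen, scanVals_eq]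
    set L := values.flatMap String.toList with hL
    by_cases hall : L.all (fun c => c == ' ' || c == '_') = true
    · rw [if_pos hall]
      by_cases hu : L.any (· == '_') = true
      · have hA1 : ¬ ((values.map (fun v => PySem.Set.ofList v.toList)).all (fun cv =>
            PySem.Set.equal cv PySem.Set.empty || PySem.Set.equal cv (PySem.Set.ofList [' '])) = true) := by
          rw [rowtype_key]
          obtain ⟨x, hx, hxe⟩ := List.any_eq_true.mp hu
          intro h
          have := h x hx
          simp [this] at hxe
        by_cases hs : L.any (· == ' ') = true
        · -- both ' ' and '_' present → "data" on both sides
          have hA2 : ¬ ((values.map (fun v => PySem.Set.ofList v.toList)).all (fun cv =>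
              PySem.Set.equal cv PySem.Set.empty || PySem.Set.equal cv (PySem.Set.ofList ['_'])) = true) := by
            rw [rowtype_key]
            obtain ⟨x, hx, hxe⟩ := List.any_eq_true.mp hs
            intro h
            have := h x hx
            simp [this] at hxe
          rw [if_neg hA1, if_neg hA2]
          simp [hu, hs]
        · -- only underscores → "separator" on both sides
          have hA2 : ((values.map (fun v => PySem.Set.ofList v.toList)).all (fun cv =>
              PySem.Set.equal cv PySem.Set.empty || PySem.Set.equal cv (PySem.Set.ofList ['_'])) = true) := by
            rw [rowtype_key]
            intro x hx
            have h1 := List.all_eq_true.mp hall x hx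
            have h2 : ¬ x = ' ' := fun he => hs (List.any_eq_true.mpr ⟨x, hx, by simp [he]⟩)
            simp [h2] at h1
            simpa using h1
          rw [if_neg hA1, if_pos hA2]
          simp [hu, hs]
      · -- no underscore: all chars are spaces → "ignore" on both sides
        have hA1 : ((values.map (fun v => PySem.Set.ofList v.toList)).all (fun cv =>
            PySem.Set.equal cv PySem.Set.empty || PySem.Set.equal cv (PySem.Set.ofList [' '])) = true) := by
          rw [rowtype_key]
          intro x hx
          have h1 := List.all_eq_true.mp hall x hx
          have h2 : ¬ x = '_' := fun he => hu (List.any_eq_true.mpr ⟨x, hx, by simp [he]⟩)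
          simp [h2] at h1
          simpa using h1
        rw [if_pos hA1]
        simp [hu]
    · -- some other character → "data" on both sides
      rw [if_neg hall]
      have hbad : ∃ x ∈ L, ¬ x = ' ' ∧ ¬ x = '_' := by
        simp only [List.all_eq_true, Bool.or_eq_true, beq_iff_eq] at hall
        push Not at hall
        exact hall
      obtain ⟨x, hx, h1, h2⟩ := hbad
      have hA1 : ¬ ((values.map (fun v => PySem.Set.ofList v.toList)).all (fun cv =>
          PySem.Set.equal cv PySem.Set.empty || PySem.Set.equal cv (PySem.Set.ofList [' '])) = true) := by
        rw [rowtype_key]; intro h; exact h1 (h x hx)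
      have hA2 : ¬ ((values.map (fun v => PySem.Set.ofList v.toList)).all (fun cv =>
          PySem.Set.equal cv PySem.Set.empty || PySem.Set.equal cv (PySem.Set.ofList ['_'])) = true) := by
        rw [rowtype_key]; intro h; exact h2 (h x hx)
      rw [if_neg hA1, if_neg hA2]
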